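-- pv_equiv track=rewrite | github.com/hos0ek71/code-tree-repository | 260113/이상한 수열/a-strange-sequence.py | jau
-- ===== SOURCE A (Python) =====
-- memo = {}
--
-- def jau(n):
--
--     if n == 1:
--         return 1
--     if n == 2:
--         return 2
--
--     if n in memo:
--         return memo[n]
--
--     memo[n] = jau(n // 3) + jau(n-1)
--
--     return memo[n]
-- ===== SOURCE B (Python) =====
-- def jau(n):
--     # Bottom-up DP table instead of memoized recursion: build jau(1..n) in one pass.
--     vals = [0, 1, 2]
--     for k in range(3, n + 1):
--         vals.append(vals[k // 3] + vals[-1])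
--     return vals[n]
-- ===== Notes on version B (the rewrite author's own statement) =====
-- stated objective: faster
-- what changed: Replaces top-down memoized recursion on a module-level dict with a bottom-up iterative DP over a plain list, removing all recursion and dict lookups (and the recursion-depth limit).
import Mathlib
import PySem

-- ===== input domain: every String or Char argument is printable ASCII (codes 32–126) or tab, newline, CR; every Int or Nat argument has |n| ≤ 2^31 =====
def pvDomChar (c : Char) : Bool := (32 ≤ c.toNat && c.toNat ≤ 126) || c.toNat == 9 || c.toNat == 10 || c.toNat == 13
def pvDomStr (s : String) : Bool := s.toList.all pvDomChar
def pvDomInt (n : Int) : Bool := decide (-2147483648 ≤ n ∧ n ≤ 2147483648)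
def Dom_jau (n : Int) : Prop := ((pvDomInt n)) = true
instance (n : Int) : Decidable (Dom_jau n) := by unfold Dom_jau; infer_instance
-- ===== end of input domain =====

-- B replaces A's top-down memoized recursion with a bottom-up DP table built in one pass;
-- A also mutates the module-level 'memo' dict, which B does not — the claim is about return values.

-- ===== PORT A =====
-- A is a memoized recursion jau(n) = jau(n//3) + jau(n-1) over a dict 'memo' (module-level in
-- Python; fresh per top call here — it only caches, the returned value is the same). The memo is
-- a hash map and the recursion carries a fuel counter bounding the depth (the chain
-- n, n-1, n-2, … has depth ≤ n); fuel = 0 is unreachable on Pre_.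
def jauMemo : Nat → Int → Std.HashMap Int Int → (Int × Std.HashMap Int Int)
  | 0, _, memo => (0, memo)
  | fuel+1, n, memo =>
    if n = 1 then (1, memo)
    else if n = 2 then (2, memo)
    else match memo[n]? with
      | some v => (v, memo)                              -- if n in memo: return memo[n]
      | none =>
        let p := jauMemo fuel (PySem.Int.floordiv n 3) memo   -- jau(n // 3)
        let q := jauMemo fuel (n - 1) p.2                     -- jau(n - 1)
        (p.1 + q.1, q.2.insert n (p.1 + q.1))                 -- memo[n] = …; return memo[n]

def jau (n : Int) : Int := (jauMemo n.toNat n ∅).1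

-- ===== PORT B =====
-- Source B: vals = [0,1,2]; for k in range(3, n+1): vals.append(vals[k//3] + vals[-1]); return vals[n].
-- The growing Python list is ported as an Array (append = push); inside the loop k ≥ 3, so the
-- index k//3 is ≥ 1 (the .toNat is exact there) and vals[-1] is its last element (back?).
def jau_alt (n : Int) : Int :=
  (PySem.List.pyGet?
    ((PySem.List.pyRange 3 (n+1) 1).foldl
      (fun (vals : Array Int) k =>
        vals.push ((vals[(PySem.Int.floordiv k 3).toNat]?).getD 0 + vals.back?.getD 0))
      #[0, 1, 2]).toList
    n).getD 0

-- ===== PRECONDITION & SPEC =====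
-- A recurses forever (RecursionError) for n ≤ 0 (n//3 and n-1 never reach the base cases).
def Pre_jau (n : Int) : Prop := 1 ≤ n
instance (n : Int) : Decidable (Pre_jau n) := by unfold Pre_jau; infer_instance
def pvWitness_jau : Int := (5)

def Spec_jau (n : Int) (out : Int) : Prop := out = jau_alt n
instance (n : Int) (out : Int) : Decidable (Spec_jau n out) := by unfold Spec_jau; infer_instance

-- ===== CLAIM (what is proved, stated in full; the proofs are below) =====
def Claim_equal_jau : Prop := ∀ (n : Int), Dom_jau n → Pre_jau n → Spec_jau n (jau n)

-- ===== LEMMAS AND PROOFS =====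

-- The mathematical sequence both programs compute.
def G : Nat → Int
  | 0 => 0
  | 1 => 1
  | 2 => 2
  | (k+3) => G ((k+3)/3) + G (k+2)
decreasing_by all_goals omega

theorem G_rec (m : Nat) (h : 3 ≤ m) : G m = G (m/3) + G (m-1) := by
  obtain ⟨k, rfl⟩ : ∃ k, m = k + 3 := ⟨m - 3, by omega⟩
  show G (k+3) = _
  rw [G]
  congr 1

-- A-side memo invariant: every cached value is correct.
def MemoInv (memo : Std.HashMap Int Int) : Prop :=
  ∀ (k : Int) (v : Int), memo[k]? = some v → v = G k.toNat

theorem memoInv_empty : MemoInv (∅ : Std.HashMap Int Int) := by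
  intro k v h
  simp at h

-- A-side: with enough fuel and a correct memo, jauMemo computes G and preserves the invariant.
theorem jauMemo_eq_G : ∀ (fuel : Nat) (n : Int) (memo : Std.HashMap Int Int),
    1 ≤ n → n ≤ (fuel : Int) → MemoInv memo →
    (jauMemo fuel n memo).1 = G n.toNat ∧ MemoInv (jauMemo fuel n memo).2 := by
  intro fuel
  induction fuel with
  | zero => intro n memo h1 h2 _; omega
  | succ f ih =>
    intro n memo h1 h2 hinv
    rw [jauMemo]
    by_cases hn1 : n = 1
    · subst hn1; rw [if_pos rfl]; exact ⟨by simp [G], hinv⟩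
    by_cases hn2 : n = 2
    · subst hn2; rw [if_neg (by norm_num : ¬(2:Int) = 1), if_pos rfl]
      exact ⟨by simp [G], hinv⟩
    have h3 : 3 ≤ n := by omega
    simp only [hn1, hn2, if_false]
    cases hm : memo[n]? with
    | some v => exact ⟨hinv n v hm, hinv⟩
    | none =>
      simp only []
      rw [PySem.Int.floordiv_eq_ediv_of_pos (by omega)]
      obtain ⟨hp1, hp2⟩ := ih (n / 3) memo (by omega) (by omega) hinv
      obtain ⟨hq1, hq2⟩ := ih (n - 1) (jauMemo f (n / 3) memo).2 (by omega) (by omega) hp2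
      have hdiv : (n / 3).toNat = n.toNat / 3 := by omega
      have hsub : (n - 1).toNat = n.toNat - 1 := by omega
      have hval : (jauMemo f (n / 3) memo).1 + (jauMemo f (n - 1) (jauMemo f (n / 3) memo).2).1
          = G n.toNat := by
        rw [hp1, hq1, hdiv, hsub, G_rec n.toNat (by omega)]
      refine ⟨hval, ?_⟩
      intro k v hk
      rw [Std.HashMap.getElem?_insert] at hk
      by_cases hkn : n == k
      · rw [if_pos hkn] at hk
        have : n = k := by simpa using hkn
        subst this
        rw [← Option.some_inj.mp hk, hval]
      · rw [if_neg hkn] at hk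
        exact hq2 k v hk

-- B-side loop invariant: the table after processing 3,…,m is #[G 0, …, G m].
theorem vals_eq (m : Nat) (h : 2 ≤ m) :
    ((PySem.List.pyRange 3 ((m : Int)+1) 1).foldl
      (fun (vals : Array Int) k =>
        vals.push ((vals[(PySem.Int.floordiv k 3).toNat]?).getD 0 + vals.back?.getD 0))
      #[0, 1, 2]).toList = (List.range (m+1)).map G := by
  induction m with
  | zero => omega
  | succ m ih =>
    by_cases hm : 2 ≤ m
    · have hprev := ih hm
      have hsplit : PySem.List.pyRange 3 ((↑(m+1) : Int)+1) 1
          = PySem.List.pyRange 3 ((m : Int)+1) 1 ++ [(m : Int)+1] := by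
        push_cast
        exact PySem.List.pyRange_one_succ_right (by exact_mod_cast by omega : (3:Int) ≤ (m:Int)+1)
      rw [hsplit, List.foldl_append]
      simp only [List.foldl_cons, List.foldl_nil]
      rw [Array.toList_push]
      set V := (PySem.List.pyRange 3 ((m : Int)+1) 1).foldl
        (fun (vals : Array Int) k =>
          vals.push ((vals[(PySem.Int.floordiv k 3).toNat]?).getD 0 + vals.back?.getD 0))
        #[0, 1, 2] with hV
      have hcast : ((m : Int) + 1) = ((m+1 : Nat) : Int) := by push_cast; ring
      have hfd : (PySem.Int.floordiv ((m : Int)+1) 3).toNat = (m+1)/3 := by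
        rw [hcast]
        rw [show PySem.Int.floordiv ((m+1 : Nat) : Int) 3 = (((m+1)/3 : Nat) : Int) from
          by exact_mod_cast PySem.Int.floordiv_natCast (m+1) 3]
        omega
      have hidx : (m+1)/3 < m+1 := by omega
      have hget1 : (V[(PySem.Int.floordiv ((m : Int)+1) 3).toNat]?).getD 0 = G ((m+1)/3) := by
        rw [hfd, ← Array.getElem?_toList, hprev]
        simp [hidx]
      have hget2 : V.back?.getD 0 = G m := by
        rw [← Array.getLast?_toList, hprev]
        have : (List.range (m+1)).map G = (List.range m).map G ++ [G m] := by
          rw [List.range_succ, List.map_append]; rfl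
        simp [this]
      rw [hget1, hget2]
      have hstep : G ((m+1)/3) + G m = G (m+1) := by
        rw [G_rec (m+1) (by omega)]; simp
      rw [hstep, hprev, List.range_succ (n := m+1), List.map_append]
      simp
    · have hm2 : m = 1 := by omega
      subst hm2
      have : PySem.List.pyRange 3 ((↑(2:Nat) : Int)+1) 1 = [] :=
        PySem.List.pyRange_one_eq_nil (by norm_num)
      rw [this]
      norm_num [List.range_succ, G]

-- B computes G on positive inputs.
theorem jau_alt_eq_G (n : Int) (h : 1 ≤ n) : jau_alt n = G n.toNat := by
  unfold jau_alt
  by_cases h1 : n = 1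
  · subst h1
    have hG : G (Int.toNat 1) = 1 := by norm_num [G]
    rw [hG]
    decide
  · have h2 : 2 ≤ n := by omega
    have hm : n = ((n.toNat : Nat) : Int) := by omega
    rw [hm]
    rw [vals_eq n.toNat (by omega)]
    rw [PySem.List.pyGet?_natCast]
    have hlt : n.toNat < n.toNat + 1 := by omega
    simp [hlt]
    congr 1
    omega

-- ===== VERDICT (by name: the statement is the Claim_ definition above) =====
theorem jau_spec : Claim_equal_jau := by
  intro n _ hpre
  unfold Spec_jau jau
  rw [(jauMemo_eq_G n.toNat n ∅ hpre (by omega) memoInv_empty).1, jau_alt_eq_G n hpre]
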